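-- pv_equiv track=rewrite | github.com/YeBoong/Coding_Test_Practice | demo1.py | solution
-- ===== SOURCE A (Python) =====
-- def solution(name_list):
--     answer = False
--     for i in range(0, len(name_list) - 1):
--         if name_list[i] == name_list[i + 1]:
--             answer = True
--
--     name_list_copy = name_list
--
--     for i in name_list:
--         for j in name_list_copy:
--             if i != j:
--                 if i in j:
--                     answer = True
--
--     return answer
-- ===== SOURCE B (Python) =====
-- def solution(name_list):
--     # adjacent duplicate: early-exit scan over consecutive pairs
--     for a, b in zip(name_list, name_list[1:]):
--         if a == b:
--             return True
--     # substring-among-set: instead of comparing every pair of names, put all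
--     # names in a hash set and ENUMERATE the proper substrings of each distinct
--     # name, testing set membership; correct because x is a substring of a
--     # different name y iff x is a strictly shorter slice y[i:j] of some y
--     names = set(name_list)
--     for y in names:
--         n = len(y)
--         for i in range(n + 1):
--             for j in range(i, n + 1):
--                 if j - i < n and y[i:j] in names:
--                     return True
--     return False
-- ===== Notes on version B (the rewrite author's own statement) =====
-- stated objective: faster
-- what changed: B replaces A's all-pairs 'i in j' scan by a hash set of the names plus enumeration of each distinct name's proper slices y[i:j] tested for set membership (correct since x is a substring of a different y iff x equals a strictly shorter slice of y), and both passes early-return on the first hit instead of A's flag-setting full loops.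
import Mathlib
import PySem

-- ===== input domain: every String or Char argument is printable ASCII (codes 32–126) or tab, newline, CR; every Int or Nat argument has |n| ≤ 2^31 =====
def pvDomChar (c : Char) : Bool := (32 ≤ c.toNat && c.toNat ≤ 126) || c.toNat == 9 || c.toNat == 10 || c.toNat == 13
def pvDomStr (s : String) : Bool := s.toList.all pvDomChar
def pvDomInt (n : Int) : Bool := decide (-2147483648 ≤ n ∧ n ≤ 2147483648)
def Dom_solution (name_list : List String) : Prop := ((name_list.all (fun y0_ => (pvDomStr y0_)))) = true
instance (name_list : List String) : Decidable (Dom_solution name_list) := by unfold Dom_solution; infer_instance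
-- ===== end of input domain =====

-- B: hash set of names + enumeration of each distinct name's proper slices tested for membership, plus an early-exit zipped adjacent scan, vs A's two full flag-setting quadratic loops.


-- ===== PORT A =====
def solution (name_list : List String) : Bool :=
  let answer : Bool :=
    (PySem.List.pyRange 0 ((name_list.length : Int) - 1) 1).foldl
      (fun ans i =>
        if PySem.List.pyGetD name_list i "" == PySem.List.pyGetD name_list (i + 1) "" then true
        else ans)
      false
  let name_list_copy := name_list
  name_list.foldl
    (fun ans i =>
      name_list_copy.foldl
        (fun ans j =>
          if i ≠ j then (if PySem.Str.isIn i j then true else ans) else ans)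
        ans)
    answer

-- ===== PORT B =====
def solution_alt (name_list : List String) : Bool :=
  if (name_list.zip (PySem.List.slice name_list (some 1) none)).any (fun p => p.1 == p.2) then
    true
  else
    let names : PySem.Set String := PySem.Set.ofList name_list
    names.any (fun y =>
      let n : Int := (PySem.Str.len y : Int)
      (PySem.List.pyRange 0 (n + 1) 1).any (fun i =>
        (PySem.List.pyRange i (n + 1) 1).any (fun j =>
          decide (j - i < n) &&
            PySem.Set.contains names (PySem.Str.slice y (some i) (some j)))))

-- ===== PRECONDITION & SPEC =====
def Spec_solution (name_list : List String) (out : Bool) : Prop := out = solution_alt name_list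
instance (name_list : List String) (out : Bool) : Decidable (Spec_solution name_list out) := by unfold Spec_solution; infer_instance

-- ===== CLAIM (what is proved, stated in full; the proofs are below) =====
def Claim_equal_solution : Prop := ∀ (name_list : List String), Dom_solution name_list → Spec_solution name_list (solution name_list)

-- ===== LEMMAS AND PROOFS =====

-- A's nested-if inner loop body in flag form
theorem foldl_flag2 {α : Type} (q : α → Prop) [DecidablePred q] (r : α → Bool) (l : List α) (a : Bool) :
    l.foldl (fun ans x => if q x then (if r x then true else ans) else ans) a
      = (a || l.any fun x => decide (q x) && r x) := by
  induction l generalizing a with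
  | nil => simp
  | cons x t ih =>
    simp only [List.foldl_cons, List.any_cons, ih]
    by_cases h : q x <;> cases r x <;> simp [h]

theorem foldl_or {α : Type} (q : α → Bool) (l : List α) (a : Bool) :
    l.foldl (fun ans x => ans || q x) a = (a || l.any q) := by
  induction l generalizing a with
  | nil => simp
  | cons x t ih => simp only [List.foldl_cons, List.any_cons, ih]; cases q x <;> simp

-- A's value as two 'any's
theorem solution_eq_any (xs : List String) :
    solution xs =
      ((PySem.List.pyRange 0 ((xs.length : Int) - 1) 1).any
          (fun i => PySem.List.pyGetD xs i "" == PySem.List.pyGetD xs (i + 1) "")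
        || xs.any fun i => xs.any fun j => decide (i ≠ j) && PySem.Str.isIn i j) := by
  unfold solution
  simp only [foldl_flag2, foldl_or, PySem.List.foldl_if_true_eq, Bool.false_or]

-- adjacent check: index loop = zip scan
theorem adj_eq (xs : List String) :
    (PySem.List.pyRange 0 ((xs.length : Int) - 1) 1).any
        (fun i => PySem.List.pyGetD xs i "" == PySem.List.pyGetD xs (i + 1) "")
      = (xs.zip (PySem.List.slice xs (some 1) none)).any (fun p => p.1 == p.2) := by
  rw [PySem.List.slice_from_one, Bool.eq_iff_iff]
  simp only [List.any_eq_true, beq_iff_eq]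
  constructor
  · rintro ⟨i, hi, heq⟩
    rw [PySem.List.mem_pyRange_one] at hi
    have hlen : i.toNat + 1 < xs.length := by omega
    have h1 : PySem.List.pyGetD xs i "" = xs[i.toNat] := by
      conv_lhs => rw [← Int.toNat_of_nonneg hi.1]
      rw [PySem.List.pyGetD_natCast]
      exact List.getD_eq_getElem xs "" (by omega)
    have h2 : PySem.List.pyGetD xs (i + 1) "" = xs[i.toNat + 1] := by
      have : i + 1 = ((i.toNat + 1 : Nat) : Int) := by omega
      rw [this, PySem.List.pyGetD_natCast]
      exact List.getD_eq_getElem xs "" hlen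
    refine ⟨(xs[i.toNat], xs[i.toNat + 1]), ?_, ?_⟩
    · refine List.mem_iff_getElem.mpr ⟨i.toNat, ?_, ?_⟩
      · simp only [List.length_zip, List.length_tail]; omega
      · rw [List.getElem_zip]
        exact congrArg _ (List.getElem_tail _)
    · rw [← h1, ← h2]; exact heq
  · rintro ⟨p, hp, heq⟩
    obtain ⟨k, hk, hget⟩ := List.mem_iff_getElem.mp hp
    have hk' : k + 1 < xs.length := by
      simp only [List.length_zip, List.length_tail] at hk; omega
    refine ⟨(k : Int), PySem.List.mem_pyRange_one.mpr ⟨by omega, by omega⟩, ?_⟩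
    rw [PySem.List.pyGetD_natCast, show ((k : Int)) + 1 = ((k + 1 : Nat) : Int) by omega,
      PySem.List.pyGetD_natCast, List.getD_eq_getElem xs "" (by omega),
      List.getD_eq_getElem xs "" hk']
    rw [List.getElem_zip] at hget
    have ht := List.getElem_tail (l := xs) (i := k)
      (h := by simp only [List.length_tail]; omega)
    rw [ht] at hget
    rw [show xs[k] = p.1 by rw [← hget], show xs[k + 1] = p.2 by rw [← hget]]
    exact heq

-- substring check: all distinct pairs of the list = proper slices of the distinct names hitting the set
theorem sub_eq (xs : List String) :
    (xs.any fun i => xs.any fun j => decide (i ≠ j) && PySem.Str.isIn i j)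
      = ((PySem.Set.ofList xs).any fun y =>
          (PySem.List.pyRange 0 (((PySem.Str.len y : Int)) + 1) 1).any (fun i =>
            (PySem.List.pyRange i (((PySem.Str.len y : Int)) + 1) 1).any (fun j =>
              decide (j - i < (PySem.Str.len y : Int)) &&
                PySem.Set.contains (PySem.Set.ofList xs) (PySem.Str.slice y (some i) (some j))))) := by
  rw [Bool.eq_iff_iff]
  simp only [List.any_eq_true, Bool.and_eq_true, decide_eq_true_eq, PySem.Set.mem_ofList,
    PySem.Str.isIn_iff_infix, PySem.List.mem_pyRange_one, PySem.Str.len_eq,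
    PySem.Set.contains_iff, PySem.Set.mem_ofList]
  constructor
  · rintro ⟨x, hx, y, hy, hne, hinf⟩
    obtain ⟨s, t, hst⟩ := id hinf
    have hlt : x.toList.length < y.toList.length := by
      rcases lt_or_eq_of_le hinf.length_le with h | h
      · exact h
      · exact absurd (String.toList_inj.mp (hinf.eq_of_length h)) hne
    have hsx : s.length + x.toList.length ≤ y.toList.length := by
      rw [← hst]; simp
    refine ⟨y, hy, (s.length : Int), ⟨by omega, by omega⟩,
      (s.length : Int) + (x.toList.length : Int), ⟨by omega, by omega⟩, by omega, ?_⟩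
    have hslice : (PySem.Str.slice y (some (s.length : Int))
        (some ((s.length : Int) + (x.toList.length : Int)))).toList = x.toList := by
      rw [PySem.Str.toList_slice, PySem.Chars.slice_eq_listSlice,
        PySem.List.slice_natCast_add, ← hst]
      simp
    rwa [String.toList_inj.mp hslice]
  · rintro ⟨y, hy, i, ⟨hi0, _⟩, j, ⟨hij, hj⟩, hlt, hmem⟩
    set x := PySem.Str.slice y (some i) (some j) with hxdef
    have hi : i = ((i.toNat : Nat) : Int) := by omega
    have hjb : j = ((j.toNat : Nat) : Int) := by omega
    have hxl : x.toList = (y.toList.drop i.toNat).take (j.toNat - i.toNat) := by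
      rw [hxdef, PySem.Str.toList_slice, PySem.Chars.slice_eq_listSlice, hi, hjb,
        PySem.List.slice_natCast]
      simp only [Int.toNat_natCast]
    have hban : j.toNat - i.toNat < y.toList.length := by omega
    have hinf : x.toList <:+: y.toList := by
      rw [hxl]
      exact ((y.toList.drop i.toNat).take_prefix _).isInfix.trans
        (y.toList.drop_suffix i.toNat).isInfix
    have hlen : x.toList.length < y.toList.length := by
      rw [hxl]
      simp only [List.length_take, List.length_drop]
      omega
    exact ⟨x, hmem, y, hy, fun h => by rw [h] at hlen; omega, hinf⟩

-- ===== VERDICT (by name: the statement is the Claim_ definition above) =====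
theorem solution_spec : Claim_equal_solution := by
  intro xs _
  unfold Spec_solution solution_alt
  rw [solution_eq_any, adj_eq, sub_eq]
  cases (xs.zip (PySem.List.slice xs (some 1) none)).any (fun p => p.1 == p.2) <;> simp
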